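-- pv_equiv track=rewrite | github.com/lyttttt3333/diffusion_v2 | diffusion_policy_code/d3fields_dev/d3fields/utils/instruction_generate/check_func.py | middle_column_check
-- ===== SOURCE A (Python) =====
-- def middle_column_check(info):
--     first_row = False
--     middle_row = False
--     last_row = False
--     for i in [0,4,8]:
--         if i in info["free_list"]:
--             first_row = True
--             break
--     for i in [1,2,5,6,9,10]:
--         if i in info["free_list"]:
--             middle_row = True
--             break
--     for i in [3,7,11]:
--         if i in info["free_list"]:
--             last_row = True
--             break
--     if first_row and middle_row and last_row:
--         return True
--     else:
--         return False
-- ===== SOURCE B (Python) =====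
-- def middle_column_check(info):
--     free = info["free_list"]
--     first = middle = last = False
--     for v in free:
--         if 0 <= v <= 11:
--             c = v % 4
--             if c == 0:
--                 first = True
--             elif c == 3:
--                 last = True
--             else:
--                 middle = True
--     return first and middle and last
-- ===== Notes on version B (the rewrite author's own statement) =====
-- stated objective: alternative
-- what changed: Single pass over free_list classifying each in-range value into its row group by v % 4 and setting three flags, instead of three separate membership scans over hard-coded index groups.
import Mathlib
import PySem

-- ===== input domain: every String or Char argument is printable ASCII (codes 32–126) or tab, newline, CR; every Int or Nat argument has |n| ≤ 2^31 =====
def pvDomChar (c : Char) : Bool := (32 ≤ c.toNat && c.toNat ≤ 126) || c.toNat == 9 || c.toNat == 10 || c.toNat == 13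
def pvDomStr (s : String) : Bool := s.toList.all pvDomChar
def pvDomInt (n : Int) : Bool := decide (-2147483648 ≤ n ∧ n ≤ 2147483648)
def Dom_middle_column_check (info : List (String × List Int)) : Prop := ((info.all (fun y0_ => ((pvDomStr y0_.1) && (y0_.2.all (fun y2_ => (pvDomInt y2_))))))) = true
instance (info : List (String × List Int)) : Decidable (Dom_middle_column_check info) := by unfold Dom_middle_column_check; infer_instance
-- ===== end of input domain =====

-- B replaces A's three membership scans over hard-coded index groups by one pass
-- over free_list classifying each in-range value via v % 4 (alternative decomposition).


-- shared dict lookup: info["free_list"] (first match, none = KeyError)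
def pvLookup (info : List (String × List Int)) (k : String) : Option (List Int) :=
  match info with
  | [] => none
  | (a, b) :: rest => if a == k then some b else pvLookup rest k

-- ===== PORT A =====
-- 'for i in group: if i in fl: flag = True; break' — first membership hit
def pvScan (group : List Int) (fl : List Int) : Bool :=
  match group with
  | [] => false
  | i :: rest => if fl.contains i then true else pvScan rest fl

def middle_column_check (info : List (String × List Int)) : Bool :=
  match pvLookup info "free_list" with
  | none => false   -- KeyError in Python; excluded by Pre_
  | some fl =>
    let first_row := pvScan [0, 4, 8] fl
    let middle_row := pvScan [1, 2, 5, 6, 9, 10] fl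
    let last_row := pvScan [3, 7, 11] fl
    if first_row && middle_row && last_row then true else false

-- ===== PORT B =====
-- single pass over free_list, classifying each in-range value by v % 4
def pvClassify (fl : List Int) (first middle last : Bool) : Bool × Bool × Bool :=
  match fl with
  | [] => (first, middle, last)
  | v :: rest =>
    if 0 ≤ v ∧ v ≤ 11 then
      let c := PySem.Int.mod v 4
      if c = 0 then pvClassify rest true middle last
      else if c = 3 then pvClassify rest first middle true
      else pvClassify rest first true last
    else pvClassify rest first middle last

def middle_column_check_alt (info : List (String × List Int)) : Bool :=
  match pvLookup info "free_list" with
  | none => false   -- KeyError in Python; excluded by Pre_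
  | some fl =>
    let r := pvClassify fl false false false
    r.1 && r.2.1 && r.2.2

-- ===== PRECONDITION & SPEC =====
-- Pre_ excludes exactly the inputs where Python A raises KeyError ("free_list" absent).
def Pre_middle_column_check (info : List (String × List Int)) : Prop :=
  "free_list" ∈ info.map Prod.fst
instance (info : List (String × List Int)) : Decidable (Pre_middle_column_check info) := by unfold Pre_middle_column_check; infer_instance
def pvWitness_middle_column_check : (List (String × List Int)) := [("free_list", [0, 1, 3])]

def Spec_middle_column_check (info : List (String × List Int)) (out : Bool) : Prop := out = middle_column_check_alt info
instance (info : List (String × List Int)) (out : Bool) : Decidable (Spec_middle_column_check info out) := by unfold Spec_middle_column_check; infer_instance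

-- ===== CLAIM (what is proved, stated in full; the proofs are below) =====
def Claim_equal_middle_column_check : Prop := ∀ (info : List (String × List Int)), Dom_middle_column_check info → Pre_middle_column_check info → Spec_middle_column_check info (middle_column_check info)

-- ===== LEMMAS AND PROOFS =====

-- the three row predicates, as B's classifier sees them
def pvIsFirst (v : Int) : Bool := decide ((0 ≤ v ∧ v ≤ 11) ∧ PySem.Int.mod v 4 = 0)
def pvIsLast (v : Int) : Bool := decide ((0 ≤ v ∧ v ≤ 11) ∧ PySem.Int.mod v 4 = 3)
def pvIsMiddle (v : Int) : Bool := decide ((0 ≤ v ∧ v ≤ 11) ∧ PySem.Int.mod v 4 ≠ 0 ∧ PySem.Int.mod v 4 ≠ 3)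

lemma pvClassify_eq (fl : List Int) (f m l : Bool) :
    pvClassify fl f m l = (f || fl.any pvIsFirst, m || fl.any pvIsMiddle, l || fl.any pvIsLast) := by
  induction fl generalizing f m l with
  | nil => simp [pvClassify]
  | cons v rest ih =>
    simp only [pvClassify, List.any_cons]
    by_cases h1 : (0 ≤ v ∧ v ≤ 11)
    · by_cases h2 : PySem.Int.mod v 4 = 0
      · have e1 : pvIsFirst v = true := by rw [pvIsFirst]; exact decide_eq_true ⟨h1, h2⟩
        have e2 : pvIsMiddle v = false := by
          rw [pvIsMiddle]; exact decide_eq_false (fun h => h.2.1 h2)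
        have e3 : pvIsLast v = false := by
          rw [pvIsLast]; exact decide_eq_false (fun h => by rw [h2] at h; exact absurd h.2 (by norm_num))
        rw [if_pos h1, if_pos h2, ih, e1, e2, e3]
        simp
      · by_cases h3 : PySem.Int.mod v 4 = 3
        · have e1 : pvIsFirst v = false := by
            rw [pvIsFirst]; exact decide_eq_false (fun h => h2 h.2)
          have e2 : pvIsMiddle v = false := by
            rw [pvIsMiddle]; exact decide_eq_false (fun h => h.2.2 h3)
          have e3 : pvIsLast v = true := by rw [pvIsLast]; exact decide_eq_true ⟨h1, h3⟩
          rw [if_pos h1, if_neg h2, if_pos h3, ih, e1, e2, e3]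
          simp
        · have e1 : pvIsFirst v = false := by
            rw [pvIsFirst]; exact decide_eq_false (fun h => h2 h.2)
          have e2 : pvIsMiddle v = true := by rw [pvIsMiddle]; exact decide_eq_true ⟨h1, h2, h3⟩
          have e3 : pvIsLast v = false := by
            rw [pvIsLast]; exact decide_eq_false (fun h => h3 h.2)
          rw [if_pos h1, if_neg h2, if_neg h3, ih, e1, e2, e3]
          simp
    · have e1 : pvIsFirst v = false := by rw [pvIsFirst]; exact decide_eq_false (fun h => h1 h.1)
      have e2 : pvIsMiddle v = false := by rw [pvIsMiddle]; exact decide_eq_false (fun h => h1 h.1)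
      have e3 : pvIsLast v = false := by rw [pvIsLast]; exact decide_eq_false (fun h => h1 h.1)
      rw [if_neg h1, ih, e1, e2, e3]
      simp

lemma pvLookup_none_not_mem (info : List (String × List Int)) (k : String)
    (h : pvLookup info k = none) : k ∉ info.map Prod.fst := by
  induction info with
  | nil => simp
  | cons p rest ih =>
    simp only [pvLookup] at h
    by_cases hk : p.1 == k
    · simp [hk] at h
    · simp only [List.map_cons, List.mem_cons]
      rintro (rfl | hmem)
      · exact hk (by simp)
      · exact ih (by simpa [hk] using h) hmem

lemma pvScan_eq_any (group fl : List Int) :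
    pvScan group fl = group.any fl.contains := by
  induction group with
  | nil => rfl
  | cons i rest ih =>
    simp only [pvScan, List.any_cons]
    cases h : fl.contains i
    · simp [ih]
    · simp

-- a single-pass classification over fl equals a membership scan of its target group
lemma any_pred_eq_scan (fl g : List Int) (p : Int → Bool)
    (hpg : ∀ v, p v = true ↔ v ∈ g) :
    fl.any p = g.any fl.contains := by
  rw [Bool.eq_iff_iff]
  simp only [List.any_eq_true]
  constructor
  · rintro ⟨v, hv, hp⟩
    exact ⟨v, (hpg v).mp hp, by simpa using hv⟩
  · rintro ⟨i, hig, hc⟩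
    exact ⟨i, by simpa using hc, (hpg i).mpr hig⟩

lemma pvIsFirst_mem (v : Int) : pvIsFirst v = true ↔ v ∈ [(0:Int), 4, 8] := by
  rw [pvIsFirst, PySem.Int.mod_eq_emod_of_pos (by norm_num : (0:Int) < 4), decide_eq_true_eq]
  constructor
  · rintro ⟨⟨h0, h11⟩, hm⟩
    have hv : v = 0 ∨ v = 4 ∨ v = 8 := by omega
    rcases hv with h | h | h <;> subst h <;> simp
  · intro hm
    simp only [List.mem_cons, List.not_mem_nil, or_false] at hm
    rcases hm with h | h | h <;> subst h <;> exact ⟨by norm_num, by decide⟩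

lemma pvIsMiddle_mem (v : Int) : pvIsMiddle v = true ↔ v ∈ [(1:Int), 2, 5, 6, 9, 10] := by
  rw [pvIsMiddle, PySem.Int.mod_eq_emod_of_pos (by norm_num : (0:Int) < 4), decide_eq_true_eq]
  constructor
  · rintro ⟨⟨h0, h11⟩, hm0, hm3⟩
    have hv : v = 1 ∨ v = 2 ∨ v = 5 ∨ v = 6 ∨ v = 9 ∨ v = 10 := by omega
    rcases hv with h | h | h | h | h | h <;> subst h <;> simp
  · intro hm
    simp only [List.mem_cons, List.not_mem_nil, or_false] at hm
    rcases hm with h | h | h | h | h | h <;> subst h <;> exact ⟨by norm_num, by decide, by decide⟩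

lemma pvIsLast_mem (v : Int) : pvIsLast v = true ↔ v ∈ [(3:Int), 7, 11] := by
  rw [pvIsLast, PySem.Int.mod_eq_emod_of_pos (by norm_num : (0:Int) < 4), decide_eq_true_eq]
  constructor
  · rintro ⟨⟨h0, h11⟩, hm⟩
    have hv : v = 3 ∨ v = 7 ∨ v = 11 := by omega
    rcases hv with h | h | h <;> subst h <;> simp
  · intro hm
    simp only [List.mem_cons, List.not_mem_nil, or_false] at hm
    rcases hm with h | h | h <;> subst h <;> exact ⟨by norm_num, by decide⟩

-- ===== VERDICT (by name: the statement is the Claim_ definition above) =====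
theorem middle_column_check_spec : Claim_equal_middle_column_check := by
  intro info _ hpre
  unfold Spec_middle_column_check middle_column_check middle_column_check_alt
  cases hfl : pvLookup info "free_list" with
  | none => exact absurd hpre (pvLookup_none_not_mem info "free_list" hfl)
  | some fl =>
    have hf := any_pred_eq_scan fl [(0:Int), 4, 8] pvIsFirst pvIsFirst_mem
    have hm := any_pred_eq_scan fl [(1:Int), 2, 5, 6, 9, 10] pvIsMiddle pvIsMiddle_mem
    have hl := any_pred_eq_scan fl [(3:Int), 7, 11] pvIsLast pvIsLast_mem
    simp only [pvClassify_eq, pvScan_eq_any, Bool.false_or, ← hf, ← hm, ← hl]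
    split_ifs with h
    · exact h.symm
    · simpa using (Bool.not_eq_true _).mp h |>.symm
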